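-- pv_equiv track=rewrite | github.com/JinfenLi/NLP_propaganda-SLC | logistic.py | SL_features
-- ===== SOURCE A (Python) =====
-- def SL_features(document, SL):
--
--     document_words = set(document)
-- # count variables for the 4 classes of subjectivity
--     weakPos = 0
--     strongPos = 0
--     weakNeg = 0
--     strongNeg = 0
--     positivecount = 0
--     negativecount = 0
--     for word in document_words:
--         if word in SL:
--             strength, posTag, isStemmed, polarity = SL[word]
--             if strength == 'weaksubj' and polarity == 'positive':
--                 weakPos += 1
--             if strength == 'strongsubj' and polarity == 'positive':
--                 strongPos += 1
--             if strength == 'weaksubj' and polarity == 'negative':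
--                 weakNeg += 1
--             if strength == 'strongsubj' and polarity == 'negative':
--                 strongNeg += 1
--             positivecount = weakPos + 2*strongPos
--             negativecount = weakNeg + 2*strongNeg
--
--     return positivecount,negativecount
-- ===== SOURCE B (Python) =====
-- def SL_features(document, SL):
--     words = set(document)
--     weights = {'weaksubj': 1, 'strongsubj': 2}
--     pos = sum(weights.get(strength, 0)
--               for word, (strength, _tag, _stem, polarity) in SL.items()
--               if polarity == 'positive' and word in words)
--     neg = sum(weights.get(strength, 0)
--               for word, (strength, _tag, _stem, polarity) in SL.items()
--               if polarity == 'negative' and word in words)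
--     return pos, neg
-- ===== Notes on version B (the rewrite author's own statement) =====
-- stated objective: alternative
-- what changed: Inverts the traversal: instead of A's single loop over the document's unique words with a dict lookup and four counters, B makes two staged passes over the lexicon's entries, membership-testing each entry's word against the document set and summing table weights for positive and negative entries separately.
import Mathlib
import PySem

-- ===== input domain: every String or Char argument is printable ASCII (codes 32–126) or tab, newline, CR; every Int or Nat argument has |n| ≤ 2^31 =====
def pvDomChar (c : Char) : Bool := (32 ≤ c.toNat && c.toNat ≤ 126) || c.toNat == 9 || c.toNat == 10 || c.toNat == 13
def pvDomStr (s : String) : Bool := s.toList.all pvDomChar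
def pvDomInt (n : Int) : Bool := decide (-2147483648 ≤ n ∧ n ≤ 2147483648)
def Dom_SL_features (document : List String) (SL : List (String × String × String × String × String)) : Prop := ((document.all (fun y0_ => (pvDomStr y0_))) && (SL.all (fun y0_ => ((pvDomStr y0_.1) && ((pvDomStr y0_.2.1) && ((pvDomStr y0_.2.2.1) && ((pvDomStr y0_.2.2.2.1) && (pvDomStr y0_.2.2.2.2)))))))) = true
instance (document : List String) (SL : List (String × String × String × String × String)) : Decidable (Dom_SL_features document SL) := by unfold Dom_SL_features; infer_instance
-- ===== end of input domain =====

-- B inverts the traversal: two staged passes over the lexicon entries with a membership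
-- test against the document set, instead of A's single loop over the document's unique
-- words with four counters (objective: alternative; same asymptotic cost).

-- ===== PORT A =====
-- state = (weakPos, strongPos, weakNeg, strongNeg, positivecount, negativecount)
def SL_features_A_step (SL : List (String × String × String × String × String))
    (s : Int × Int × Int × Int × Int × Int) (word : String) : Int × Int × Int × Int × Int × Int :=
  match (PySem.Dict.mk SL).get? word with
  | none => s
  | some (strength, _posTag, _isStemmed, polarity) =>
    let (weakPos, strongPos, weakNeg, strongNeg, _, _) := s
    let weakPos := if strength = "weaksubj" ∧ polarity = "positive" then weakPos + 1 else weakPos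
    let strongPos := if strength = "strongsubj" ∧ polarity = "positive" then strongPos + 1 else strongPos
    let weakNeg := if strength = "weaksubj" ∧ polarity = "negative" then weakNeg + 1 else weakNeg
    let strongNeg := if strength = "strongsubj" ∧ polarity = "negative" then strongNeg + 1 else strongNeg
    (weakPos, strongPos, weakNeg, strongNeg, weakPos + 2 * strongPos, weakNeg + 2 * strongNeg)

def SL_features (document : List String) (SL : List (String × String × String × String × String)) : Int × Int :=
  let document_words := PySem.Set.ofList document
  let s := document_words.foldl (SL_features_A_step SL) (0, 0, 0, 0, 0, 0)
  (s.2.2.2.2.1, s.2.2.2.2.2)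

-- ===== PORT B =====
def SL_weightTable : PySem.Dict String Int := PySem.Dict.mk [("weaksubj", 1), ("strongsubj", 2)]

def SL_features_alt (document : List String) (SL : List (String × String × String × String × String)) : Int × Int :=
  let words := PySem.Set.ofList document
  let items := (PySem.Dict.mk SL).items
  let pos := ((items.filter (fun kv => kv.2.2.2.2 == "positive" && PySem.Set.contains words kv.1)).map
      (fun kv => SL_weightTable.getD kv.2.1 0)).sum
  let neg := ((items.filter (fun kv => kv.2.2.2.2 == "negative" && PySem.Set.contains words kv.1)).map
      (fun kv => SL_weightTable.getD kv.2.1 0)).sum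
  (pos, neg)

-- ===== PRECONDITION & SPEC =====
-- Pre_ excludes association lists carrying the same dict key twice: a real Python dict
-- cannot hold duplicate keys (they collapse at construction), so which entry such a list
-- denotes is a defensible-corner ambiguity of the assoc-list model, not a behaviour of A.
def Pre_SL_features (document : List String) (SL : List (String × String × String × String × String)) : Prop :=
  (SL.map Prod.fst).Nodup
instance (document : List String) (SL : List (String × String × String × String × String)) : Decidable (Pre_SL_features document SL) := by unfold Pre_SL_features; infer_instance

def pvWitness_SL_features : List String × (List (String × String × String × String × String)) :=
  (["good", "bad"], [("good", "weaksubj", "adj", "n", "positive"), ("bad", "strongsubj", "adj", "n", "negative")])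

def Spec_SL_features (document : List String) (SL : List (String × String × String × String × String)) (out : Int × Int) : Prop := out = SL_features_alt document SL
instance (document : List String) (SL : List (String × String × String × String × String)) (out : Int × Int) : Decidable (Spec_SL_features document SL out) := by unfold Spec_SL_features; infer_instance

-- ===== CLAIM (what is proved, stated in full; the proofs are below) =====
def Claim_equal_SL_features : Prop := ∀ (document : List String) (SL : List (String × String × String × String × String)), Dom_SL_features document SL → Pre_SL_features document SL → Spec_SL_features document SL (SL_features document SL)

-- ===== LEMMAS AND PROOFS =====

-- weight an entry's value contributes to the positive (resp. negative) total
def SL_wPos (v : String × String × String × String) : Int :=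
  if v.2.2.2 = "positive" then SL_weightTable.getD v.1 0 else 0
def SL_wNeg (v : String × String × String × String) : Int :=
  if v.2.2.2 = "negative" then SL_weightTable.getD v.1 0 else 0

-- value A's loop adds for a word, expressed through the weight table
def SL_lexPos (SL : List (String × String × String × String × String)) (w : String) : Int :=
  match (PySem.Dict.mk SL).get? w with
  | none => 0
  | some v => SL_wPos v
def SL_lexNeg (SL : List (String × String × String × String × String)) (w : String) : Int :=
  match (PySem.Dict.mk SL).get? w with
  | none => 0
  | some v => SL_wNeg v

lemma SL_weight_weak : SL_weightTable.getD "weaksubj" 0 = 1 := by decide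
lemma SL_weight_strong : SL_weightTable.getD "strongsubj" 0 = 2 := by decide
lemma SL_weight_other (st : String) (hw : st ≠ "weaksubj") (hs : st ≠ "strongsubj") :
    SL_weightTable.getD st 0 = 0 := by
  simp [SL_weightTable, PySem.Dict.getD, PySem.Dict.get?, Ne.symm hw, Ne.symm hs]

-- A's loop computes the two weighted running sums.
lemma SL_features_A_as_sums (SL : List (String × String × String × String × String))
    (words : List String) : ∀ (wp sp wn sn : Int),
    ((words.foldl (SL_features_A_step SL) (wp, sp, wn, sn, wp + 2 * sp, wn + 2 * sn)).2.2.2.2.1,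
     (words.foldl (SL_features_A_step SL) (wp, sp, wn, sn, wp + 2 * sp, wn + 2 * sn)).2.2.2.2.2)
    = (wp + 2 * sp + (words.map (SL_lexPos SL)).sum, wn + 2 * sn + (words.map (SL_lexNeg SL)).sum) := by
  induction words with
  | nil => intro wp sp wn sn; simp
  | cons w ws ih =>
    intro wp sp wn sn
    simp only [List.foldl_cons, List.map_cons, List.sum_cons]
    cases h : (PySem.Dict.mk SL).get? w with
    | none =>
      have hp0 : SL_lexPos SL w = 0 := by simp [SL_lexPos, h]
      have hn0 : SL_lexNeg SL w = 0 := by simp [SL_lexNeg, h]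
      simp only [SL_features_A_step, h, hp0, hn0]
      rw [ih]
      simp only [Prod.mk.injEq]
      constructor <;> ring
    | some v =>
      obtain ⟨st, tg, sm, pol⟩ := v
      have hp1 : SL_lexPos SL w = (if pol = "positive" then SL_weightTable.getD st 0 else 0) := by
        simp [SL_lexPos, h, SL_wPos]
      have hn1 : SL_lexNeg SL w = (if pol = "negative" then SL_weightTable.getD st 0 else 0) := by
        simp [SL_lexNeg, h, SL_wNeg]
      simp only [SL_features_A_step, h]
      rw [ih, hp1, hn1]
      simp only [Prod.mk.injEq]
      by_cases hw : st = "weaksubj" <;> by_cases hs : st = "strongsubj" <;>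
        by_cases hpp : pol = "positive" <;> by_cases hnn : pol = "negative"
      all_goals try exact absurd (hw.symm.trans hs) (by decide)
      all_goals try exact absurd (hpp.symm.trans hnn) (by decide)
      all_goals try rw [SL_weight_other st hw hs]
      all_goals simp [hw, hs, hpp, hnn, SL_weight_weak, SL_weight_strong]
      all_goals ring

-- replacing one summand in a sum over a duplicate-free list
lemma SL_sum_ite_replace (ws : List String) (hnd : ws.Nodup) (k : String) (a : Int) (h : String → Int) :
    (ws.map (fun w => if k = w then a else h w)).sum
    = (ws.map h).sum + (if k ∈ ws then a - h k else 0) := by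
  induction ws with
  | nil => simp
  | cons x xs ih =>
    rcases List.nodup_cons.mp hnd with ⟨hx, hxs⟩
    by_cases hk : k = x
    · subst hk
      simp only [List.map_cons, List.sum_cons, List.mem_cons, true_or, if_true]
      rw [List.map_congr_left (fun w hw => if_neg (fun he => hx (by rw [he]; exact hw)))]
      ring
    · simp only [List.map_cons, List.sum_cons, if_neg hk, List.mem_cons,
        (show (k = x ∨ k ∈ xs) ↔ k ∈ xs by simp [hk])]
      rw [ih hxs]; ring

-- the core exchange: a sum of lookups over distinct words equals a sum over the
-- lexicon's entries filtered by membership of their key (keys duplicate-free)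
lemma SL_sum_lookup_eq_sum_filter (g : (String × String × String × String) → Int) :
    ∀ (SL : List (String × String × String × String × String)) (ws : List String),
    (SL.map Prod.fst).Nodup → ws.Nodup →
    (ws.map (fun w => match (PySem.Dict.mk SL).get? w with | none => 0 | some v => g v)).sum
    = ((SL.filter (fun kv => ws.contains kv.1)).map (fun kv => g kv.2)).sum := by
  intro SL
  induction SL with
  | nil =>
    intro ws _ _
    simp [PySem.Dict.get?]
  | cons kv rest ih =>
    intro ws hkeys hws
    obtain ⟨k, v⟩ := kv
    rcases List.nodup_cons.mp hkeys with ⟨hk, hrest⟩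
    have hk' : k ∉ (rest.map Prod.fst) := hk
    have hlook : ∀ w, (PySem.Dict.mk ((k, v) :: rest)).get? w
        = if k = w then some v else (PySem.Dict.mk rest).get? w := by
      intro w
      rw [PySem.Dict.get?_mk_cons]
      simp [beq_iff_eq]
    have hnone : (PySem.Dict.mk rest).get? k = none := by
      rw [PySem.Dict.get?_eq_none_iff_not_mem_keys]
      simpa [PySem.Dict.keys_mk] using hk'
    calc (ws.map (fun w => match (PySem.Dict.mk ((k, v) :: rest)).get? w with | none => 0 | some v' => g v')).sum
        = (ws.map (fun w => if k = w then g v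
            else (match (PySem.Dict.mk rest).get? w with | none => 0 | some v' => g v'))).sum := by
          apply congrArg
          apply List.map_congr_left
          intro w _
          rw [hlook w]
          by_cases h : k = w <;> simp [h]
      _ = (ws.map (fun w => match (PySem.Dict.mk rest).get? w with | none => 0 | some v' => g v')).sum
            + (if k ∈ ws then g v else 0) := by
          rw [SL_sum_ite_replace ws hws k (g v)
            (fun w => match (PySem.Dict.mk rest).get? w with | none => 0 | some v' => g v')]
          simp [hnone]
      _ = ((rest.filter (fun kv => ws.contains kv.1)).map (fun kv => g kv.2)).sum
            + (if k ∈ ws then g v else 0) := by rw [ih ws hrest hws]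
      _ = ((((k, v) :: rest).filter (fun kv => ws.contains kv.1)).map (fun kv => g kv.2)).sum := by
          rw [List.filter_cons]
          by_cases h : k ∈ ws
          · simp [h]
            ring
          · simp [h]

-- a conjunction filter split into a membership filter and an if-weight
lemma SL_filter_and_sum (l : List (String × String × String × String × String))
    (p q : (String × String × String × String × String) → Bool)
    (f : (String × String × String × String × String) → Int) :
    ((l.filter (fun x => p x && q x)).map f).sum
    = ((l.filter q).map (fun x => if p x then f x else 0)).sum := by
  induction l with
  | nil => simp
  | cons x xs ih =>
    rw [List.filter_cons, List.filter_cons]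
    cases hp : p x <;> cases hq : q x <;> simp [hp, ih]

-- pointwise Bool form of the positive / negative entry weights
lemma SL_wPos_eq (v : String × String × String × String) :
    SL_wPos v = if v.2.2.2 == "positive" then SL_weightTable.getD v.1 0 else 0 := by
  by_cases h : v.2.2.2 = "positive" <;> simp [SL_wPos, h]
lemma SL_wNeg_eq (v : String × String × String × String) :
    SL_wNeg v = if v.2.2.2 == "negative" then SL_weightTable.getD v.1 0 else 0 := by
  by_cases h : v.2.2.2 = "negative" <;> simp [SL_wNeg, h]

-- ===== VERDICT (by name: the statement is the Claim_ definition above) =====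
theorem SL_features_spec : Claim_equal_SL_features := by
  intro document SL _ hpre
  unfold Spec_SL_features
  have hnd : (PySem.Set.ofList document).Nodup := PySem.Set.nodup_ofList document
  have hA : SL_features document SL
      = ((List.map (SL_lexPos SL) (PySem.Set.ofList document)).sum,
         (List.map (SL_lexNeg SL) (PySem.Set.ofList document)).sum) := by
    have h := SL_features_A_as_sums SL (PySem.Set.ofList document) 0 0 0 0
    simpa [SL_features] using h
  have hpos : (List.map (SL_lexPos SL) (PySem.Set.ofList document)).sum
      = ((SL.filter (fun kv => (PySem.Set.ofList document).contains kv.1)).map (fun kv => SL_wPos kv.2)).sum :=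
    SL_sum_lookup_eq_sum_filter SL_wPos SL (PySem.Set.ofList document) hpre hnd
  have hneg : (List.map (SL_lexNeg SL) (PySem.Set.ofList document)).sum
      = ((SL.filter (fun kv => (PySem.Set.ofList document).contains kv.1)).map (fun kv => SL_wNeg kv.2)).sum :=
    SL_sum_lookup_eq_sum_filter SL_wNeg SL (PySem.Set.ofList document) hpre hnd
  rw [funext (fun kv : String × String × String × String × String => SL_wPos_eq kv.2)] at hpos
  rw [funext (fun kv : String × String × String × String × String => SL_wNeg_eq kv.2)] at hneg
  have hposf := SL_filter_and_sum SL (fun kv => kv.2.2.2.2 == "positive")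
      (fun kv => (PySem.Set.ofList document).contains kv.1)
      (fun kv => SL_weightTable.getD kv.2.1 0)
  have hnegf := SL_filter_and_sum SL (fun kv => kv.2.2.2.2 == "negative")
      (fun kv => (PySem.Set.ofList document).contains kv.1)
      (fun kv => SL_weightTable.getD kv.2.1 0)
  rw [hA]
  show _ = SL_features_alt document SL
  simp only [SL_features_alt]
  rw [hpos, hneg, hposf, hnegf]
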